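-- pv_equiv track=rewrite | github.com/github-kamilk/AiSD | Lista_6/L6_ZAD4.py | remove_blank_space
-- ===== SOURCE A (Python) =====
-- def remove_blank_space(list):
--     leng = len(list)
--     i = 0
--     while i < leng:
--         if list[i] in ['+', '-', '*', '/'] and list[i + 1] == '(' and list[i + 2] == '' and list[i + 3] == ')':
--             list.pop(i)
--             list.pop(i)
--             list.pop(i)
--             list.pop(i)
--             leng -= 4
--         else:
--             i += 1
--     return list
-- ===== SOURCE B (Python) =====
-- def remove_blank_space(list):
--     result = []
--     i = 0
--     n = len(list)
--     while i < n:
--         if list[i] in ('+', '-', '*', '/') and list[i + 1:i + 4] == ['(', '', ')']: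
--             i += 4
--         else:
--             result.append(list[i])
--             i += 1
--     return result
-- ===== Notes on version B (the rewrite author's own statement) =====
-- stated objective: alternative
-- what changed: B builds a new list in one forward pass, skipping matched 4-element patterns by advancing the index, instead of A's in-place pop(i) calls that shift the remainder of the list on every match.
import Mathlib
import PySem

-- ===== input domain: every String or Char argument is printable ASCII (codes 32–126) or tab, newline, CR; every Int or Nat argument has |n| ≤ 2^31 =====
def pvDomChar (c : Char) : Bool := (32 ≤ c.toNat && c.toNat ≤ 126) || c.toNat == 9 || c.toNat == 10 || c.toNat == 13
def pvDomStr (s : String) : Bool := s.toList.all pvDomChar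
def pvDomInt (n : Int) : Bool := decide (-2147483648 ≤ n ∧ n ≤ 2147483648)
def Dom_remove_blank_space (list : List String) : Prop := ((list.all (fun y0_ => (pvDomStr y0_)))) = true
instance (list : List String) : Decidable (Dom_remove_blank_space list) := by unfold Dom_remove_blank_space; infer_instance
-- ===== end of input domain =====

-- B changes the algorithm: one forward pass building a fresh list instead of A's in-place
-- pop(i) loop; A also mutates its argument in place — the equivalence proved here is about
-- the RETURN value only.

-- Python's ['+', '-', '*', '/'] membership test, the literal both programs use
def pvOps : List String := ["+", "-", "*", "/"]

-- ===== PORT A =====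
-- A's while-loop over the mutating list; `leng` always equals the current list length, so
-- the loop guard `i < leng` is ported as `i < l.length`.  The fuel argument only makes the
-- loop total (each iteration strictly decreases l.length - i, so `length + 1` fuel always
-- suffices).  A's lookahead `list[i+1]` etc. RAISES IndexError out of range; the port's
-- condition is then false (Pre_ excludes those inputs, so there the port and Python A are
-- never compared).
def rbsGoA : Nat → List String → Nat → List String
  | 0, l, _ => l
  | fuel + 1, l, i =>
    if i < l.length then
      if (PySem.List.pyGet? l (i : Int)).any (fun s => pvOps.contains s)
          && (PySem.List.pyGet? l ((i : Int) + 1) == some "(")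
          && (PySem.List.pyGet? l ((i : Int) + 2) == some "")
          && (PySem.List.pyGet? l ((i : Int) + 3) == some ")") then
        -- four successive list.pop(i)
        rbsGoA fuel ((((l.eraseIdx i).eraseIdx i).eraseIdx i).eraseIdx i) i
      else
        rbsGoA fuel l (i + 1)
    else l

def remove_blank_space (list : List String) : List String := rbsGoA (list.length + 1) list 0

-- ===== PORT B =====
-- B's while-loop: index i over the unchanged input, appending kept elements to `result`;
-- a match is skipped by i += 4 (list[i+1:i+4] == ['(', '', ')'] via PySem slice).  The fuel
-- argument only makes the loop total (i strictly increases up to the length).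
def rbsGoB : Nat → List String → Nat → List String → List String
  | 0, _, _, result => result
  | fuel + 1, l, i, result =>
    if i < l.length then
      if (pvOps.contains (PySem.List.pyGetD l (i : Int) ""))
          && (PySem.List.slice l (some ((i : Int) + 1)) (some ((i : Int) + 4)) == ["(", "", ")"]) then
        rbsGoB fuel l (i + 4) result
      else
        rbsGoB fuel l (i + 1) (result ++ [PySem.List.pyGetD l (i : Int) ""])
    else result

def remove_blank_space_alt (list : List String) : List String := rbsGoB (list.length + 1) list 0 []

-- ===== PRECONDITION & SPEC =====
-- Pre_ excludes exactly the inputs on which Python A raises IndexError: the lookahead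
-- list[i+1..i+3] runs past the end iff the list ends in an operator, in [op,'('] or in
-- [op,'(','']  (such a trailing operator is never consumed by a match, so the scan always
-- reaches it).  A returns normally on every other input.
def pvCrashy (l : List String) : Bool :=
  match l.reverse with
  | [] => false
  | a :: rest =>
      pvOps.contains a ||
      (match rest with
       | [] => false
       | b :: rest2 =>
           (a == "(" && pvOps.contains b) ||
           (match rest2 with
            | [] => false
            | c :: _ => a == "" && b == "(" && pvOps.contains c))

def Pre_remove_blank_space (list : List String) : Prop := pvCrashy list = false
instance (list : List String) : Decidable (Pre_remove_blank_space list) := by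
  unfold Pre_remove_blank_space; infer_instance

def pvWitness_remove_blank_space : List String := ["+", "(", "", ")", "x"]

def Spec_remove_blank_space (list : List String) (out : List String) : Prop := out = remove_blank_space_alt list
instance (list : List String) (out : List String) : Decidable (Spec_remove_blank_space list out) := by unfold Spec_remove_blank_space; infer_instance

-- ===== CLAIM (what is proved, stated in full; the proofs are below) =====
def Claim_equal_remove_blank_space : Prop := ∀ (list : List String), Dom_remove_blank_space list → Pre_remove_blank_space list → Spec_remove_blank_space list (remove_blank_space list)

-- ===== LEMMAS AND PROOFS =====

-- Both ports compute this one-pass specification of the result.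
def fSpec : List String → List String
  | a :: b :: c :: d :: r =>
      if pvOps.contains a && b == "(" && c == "" && d == ")" then fSpec r
      else a :: fSpec (b :: c :: d :: r)
  | l => l

theorem pyGetPre (pre s : List String) (j : Nat) :
    PySem.List.pyGet? (pre ++ s) (((pre.length + j : Nat) : Int)) = s[j]? := by
  rw [PySem.List.pyGet?_natCast, List.getElem?_append_right (by omega)]
  congr 1
  omega

theorem rbsGoA_eq_fSpec (fuel : Nat) :
    ∀ (s pre : List String), s.length ≤ fuel → rbsGoA fuel (pre ++ s) pre.length = pre ++ fSpec s := by
  induction fuel with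
  | zero =>
      intro s pre hs
      have : s = [] := List.eq_nil_of_length_eq_zero (by omega)
      subst this
      simp [rbsGoA, fSpec]
  | succ n ih =>
      intro s pre hs
      rcases hs0 : s with _ | ⟨a, t⟩
      · rw [rbsGoA, if_neg (by simp)]
        simp [fSpec]
      · have c0 : ((pre.length : Nat) : Int) = ((pre.length + 0 : Nat) : Int) := by push_cast; ring
        have c1 : ((pre.length : Nat) : Int) + 1 = ((pre.length + 1 : Nat) : Int) := by push_cast; ring
        have c2 : ((pre.length : Nat) : Int) + 2 = ((pre.length + 2 : Nat) : Int) := by push_cast; ring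
        have c3 : ((pre.length : Nat) : Int) + 3 = ((pre.length + 3 : Nat) : Int) := by push_cast; ring
        have step_keep : rbsGoA n (pre ++ a :: t) (pre.length + 1) = pre ++ a :: fSpec t := by
          have h1 : pre ++ a :: t = (pre ++ [a]) ++ t := by simp
          have h2 : pre.length + 1 = (pre ++ [a]).length := by simp
          rw [h1, h2, ih t (pre ++ [a]) (by simpa [hs0] using hs)]
          simp
        rw [rbsGoA, if_pos (by simp)]
        rcases t with _ | ⟨b, t⟩
        · -- s = [a] : lookahead at +3 is out of range, element kept
          rw [if_neg (by rw [c3, pyGetPre]; simp)]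
          rw [step_keep]
          simp [fSpec]
        · rcases t with _ | ⟨c, t⟩
          · rw [if_neg (by rw [c3, pyGetPre]; simp)]
            rw [step_keep]
            simp [fSpec]
          · rcases t with _ | ⟨d, r⟩
            · rw [if_neg (by rw [c3, pyGetPre]; simp)]
              rw [step_keep]
              simp [fSpec]
            · -- s = a :: b :: c :: d :: r : the full pattern test
              by_cases hm : (pvOps.contains a && b == "(" && c == "" && d == ")") = true
              · rw [if_pos (by rw [c3, c2, c1, c0, pyGetPre, pyGetPre, pyGetPre, pyGetPre]; simp only [Bool.and_eq_true, beq_iff_eq] at hm; simp [hm.1.1.2, hm.1.2, hm.2]; simpa using hm.1.1.1)]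
                have herase : ((((pre ++ a :: b :: c :: d :: r).eraseIdx pre.length).eraseIdx
                    pre.length).eraseIdx pre.length).eraseIdx pre.length = pre ++ r := by
                  rw [List.eraseIdx_append_of_length_le (le_refl _),
                      List.eraseIdx_append_of_length_le (le_refl _),
                      List.eraseIdx_append_of_length_le (le_refl _),
                      List.eraseIdx_append_of_length_le (le_refl _)]
                  simp
                rw [herase, ih r pre (by simp [hs0] at hs; omega)]
                rw [fSpec, if_pos hm]
              · rw [if_neg (by rw [c3, c2, c1, c0, pyGetPre, pyGetPre, pyGetPre, pyGetPre]; simp only [Bool.and_eq_true, beq_iff_eq] at hm ⊢; simpa using hm)]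
                rw [step_keep]
                rw [fSpec, if_neg hm]

theorem rbsGoB_eq_fSpec (fuel : Nat) :
    ∀ (l : List String) (i : Nat) (acc : List String), l.length - i ≤ fuel →
      rbsGoB fuel l i acc = acc ++ fSpec (l.drop i) := by
  induction fuel with
  | zero =>
      intro l i acc hf
      rw [rbsGoB, List.drop_eq_nil_of_le (by omega)]
      simp [fSpec]
  | succ n ih =>
  intro l i acc hf
  rw [rbsGoB]
  by_cases h : i < l.length
  · rw [if_pos h]
    have hd : l.drop i = l[i] :: l.drop (i + 1) := List.drop_eq_getElem_cons h
    have hget : PySem.List.pyGetD l ((i : Nat) : Int) "" = l[i] := by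
      rw [PySem.List.pyGetD_natCast, List.getD_eq_getElem?_getD, List.getElem?_eq_getElem h]
      rfl
    have hslice : PySem.List.slice l (some ((i : Int) + 1)) (some ((i : Int) + 4))
        = (l.drop (i + 1)).take 3 := by
      have c1 : ((i : Nat) : Int) + 1 = ((i + 1 : Nat) : Int) := by push_cast; ring
      have c4 : ((i : Nat) : Int) + 4 = ((i + 4 : Nat) : Int) := by push_cast; ring
      rw [c1, c4, PySem.List.slice_natCast]
      congr 1
      omega
    by_cases hc : ((pvOps.contains (PySem.List.pyGetD l ((i : Nat) : Int) ""))
        && (PySem.List.slice l (some ((i : Int) + 1)) (some ((i : Int) + 4)) == ["(", "", ")"])) = true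
    · rw [if_pos hc]
      simp only [Bool.and_eq_true, beq_iff_eq] at hc
      rw [hget] at hc
      rw [hslice] at hc
      obtain ⟨hop, htake⟩ := hc
      have hop' : l[i] ∈ pvOps := by simpa using hop
      -- the slice equality forces drop (i+1) = "(" :: "" :: ")" :: drop (i+4)
      have h3 : l.drop (i + 1) = "(" :: "" :: ")" :: l.drop (i + 4) := by
        rcases e : l.drop (i + 1) with _ | ⟨b, t1⟩
        · rw [e] at htake; simp at htake
        · rcases e1 : t1 with _ | ⟨c, t2⟩
          · rw [e, e1] at htake; simp at htake
          · rcases e2 : t2 with _ | ⟨d, t3⟩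
            · rw [e, e1, e2] at htake; simp at htake
            · rw [e, e1, e2] at htake
              simp only [List.take_succ_cons, List.take_zero, List.cons.injEq, and_true] at htake
              obtain ⟨hb, hc', hd'⟩ := htake
              subst hb; subst hc'; subst hd'
              have ht3 : l.drop (i + 4) = t3 := by
                have : l.drop (i + 4) = (l.drop (i + 1)).drop 3 := by rw [List.drop_drop]
                rw [this, e, e1, e2]
                rfl
              rw [ht3]
      rw [ih l (i + 4) acc (by omega)]
      have hf4 : fSpec (l.drop i) = fSpec (l.drop (i + 4)) := by
        rw [hd, h3, fSpec, if_pos (by simp [hop'])]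
      rw [hf4]
    · rw [if_neg hc]
      rw [ih l (i + 1) _ (by omega)]
      have hf1 : fSpec (l.drop i) = l[i] :: fSpec (l.drop (i + 1)) := by
        rw [hd]
        rcases e : l.drop (i + 1) with _ | ⟨b, t1⟩
        · simp [fSpec]
        · rcases e1 : t1 with _ | ⟨c, t2⟩
          · simp [fSpec]
          · rcases e2 : t2 with _ | ⟨d, t3⟩
            · simp [fSpec]
            · rw [fSpec, if_neg]
              by_contra hcc
              apply hc
              simp only [Bool.and_eq_true, beq_iff_eq] at hcc ⊢
              rw [hget, hslice, e, e1, e2]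
              simp only [List.take_succ_cons, List.take_zero]
              exact ⟨hcc.1.1.1, by rw [hcc.1.1.2, hcc.1.2, hcc.2]⟩
      rw [hf1, hget]
      simp
  · rw [if_neg h]
    rw [List.drop_eq_nil_of_le (by omega)]
    simp [fSpec]

-- ===== VERDICT (by name: the statement is the Claim_ definition above) =====
theorem remove_blank_space_spec : Claim_equal_remove_blank_space := by
  intro l _ _
  unfold Spec_remove_blank_space remove_blank_space remove_blank_space_alt
  have hA := rbsGoA_eq_fSpec (l.length + 1) l [] (by omega)
  have hB := rbsGoB_eq_fSpec (l.length + 1) l 0 [] (by omega)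
  simp only [List.nil_append, List.length_nil, List.drop_zero] at hA hB
  rw [hA, hB]
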